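-- pv_equiv track=rewrite | github.com/KimSky904/Mirim-School-Hub | CosProPython/모의고사2회/2-7.py | solution
-- ===== SOURCE A (Python) =====
-- def solution(str) :
--     answer = []
--     for c in str :
--         if '0'<=c<='9' :
--             n = ord('i') - ord(c)
--             c = chr(n)
--         answer.append(c)
--     return ''.join(answer)
-- ===== SOURCE B (Python) =====
-- def solution(str):
--     n = len(str)
--     if n == 0:
--         return ''
--     if n == 1:
--         return chr(105 - ord(str)) if '0' <= str <= '9' else str
--     m = n // 2
--     return solution(str[:m]) + solution(str[m:])
-- ===== Notes on version B (the rewrite author's own statement) =====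
-- stated objective: alternative
-- what changed: Replaces A's linear accumulator loop with a divide-and-conquer recursion that splits the string in half, transforms each half recursively (single-character base case), and concatenates the results.
import Mathlib
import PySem

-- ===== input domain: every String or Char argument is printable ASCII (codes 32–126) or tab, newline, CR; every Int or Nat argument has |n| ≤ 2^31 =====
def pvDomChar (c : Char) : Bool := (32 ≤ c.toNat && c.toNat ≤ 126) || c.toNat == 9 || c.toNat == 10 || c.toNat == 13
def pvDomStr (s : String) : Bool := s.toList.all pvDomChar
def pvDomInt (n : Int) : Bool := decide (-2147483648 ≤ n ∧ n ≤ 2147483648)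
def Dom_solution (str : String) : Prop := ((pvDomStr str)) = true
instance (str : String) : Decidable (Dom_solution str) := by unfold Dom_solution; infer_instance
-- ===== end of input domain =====

-- B replaces A's linear accumulator loop by a divide-and-conquer recursion:
-- split in half, recurse on both halves, concatenate; same result, different structure.

-- ===== PORT A =====
-- A: accumulate characters into `answer`, rewriting each digit c to chr(ord('i')-ord(c)).
def solution (str : String) : String :=
  String.ofList (str.toList.foldl
    (fun answer c =>
      if '0' ≤ c ∧ c ≤ '9' then answer ++ [Char.ofNat (105 - c.toNat)]
      else answer ++ [c]) [])

-- ===== PORT B =====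
-- B on the character list: n = len; n==0 -> ''; n==1 -> transformed char;
-- else m = n//2; solution(str[:m]) + solution(str[m:]).
-- (str[:m] and str[m:] with 0 ≤ m ≤ n are exactly take m / drop m.)
def solutionAltGo : List Char → List Char
  | [] => []
  | [c] => [if '0' ≤ c ∧ c ≤ '9' then Char.ofNat (105 - c.toNat) else c]
  | c₁ :: c₂ :: t =>
      solutionAltGo ((c₁ :: c₂ :: t).take ((c₁ :: c₂ :: t).length / 2)) ++
      solutionAltGo ((c₁ :: c₂ :: t).drop ((c₁ :: c₂ :: t).length / 2))
termination_by l => l.length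
decreasing_by
  all_goals simp only [List.length_take, List.length_drop, List.length_cons]; omega

def solution_alt (str : String) : String := String.ofList (solutionAltGo str.toList)

-- ===== PRECONDITION & SPEC =====
def Spec_solution (str : String) (out : String) : Prop := out = solution_alt str
instance (str : String) (out : String) : Decidable (Spec_solution str out) := by unfold Spec_solution; infer_instance

-- ===== CLAIM (what is proved, stated in full; the proofs are below) =====
def Claim_equal_solution : Prop := ∀ (str : String), Dom_solution str → Spec_solution str (solution str)

-- ===== LEMMAS AND PROOFS =====

theorem foldl_solution :
    ∀ (l acc : List Char),
      l.foldl (fun answer c =>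
        if '0' ≤ c ∧ c ≤ '9' then answer ++ [Char.ofNat (105 - c.toNat)]
        else answer ++ [c]) acc
      = acc ++ l.map (fun c => if '0' ≤ c ∧ c ≤ '9' then Char.ofNat (105 - c.toNat) else c) := by
  intro l
  induction l with
  | nil => simp
  | cons c t ih =>
    intro acc
    by_cases h : '0' ≤ c ∧ c ≤ '9' <;> simp [List.foldl, h, ih]

theorem solutionAltGo_eq_map (l : List Char) :
    solutionAltGo l
      = l.map (fun c => if '0' ≤ c ∧ c ≤ '9' then Char.ofNat (105 - c.toNat) else c) := by
  induction l using solutionAltGo.induct with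
  | case1 => simp [solutionAltGo]
  | case2 c => simp [solutionAltGo]
  | case3 c₁ c₂ t ih1 ih2 =>
    rw [solutionAltGo, ih1, ih2, ← List.map_append, List.take_append_drop]

-- ===== VERDICT (by name: the statement is the Claim_ definition above) =====
theorem solution_spec : Claim_equal_solution := by
  intro str _
  show _ = _
  unfold solution solution_alt
  rw [foldl_solution, List.nil_append, solutionAltGo_eq_map]
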